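-- pv_equiv track=rewrite | github.com/fortegavolusia/cid-main | azure-auth-app/test_apps/fastapi_app/cids_auth.py | _has_field_permission
-- ===== SOURCE A (Python) =====
-- from typing import Dict, List, Any, Optional, Set, Union, Callable
--
-- def _has_field_permission(permission_key: str, permission_set: Set[str]) -> bool:
--     """Check if user has permission for a specific field"""
--     # Direct permission
--     if permission_key in permission_set:
--         return True
--
--     # Check wildcards
--     parts = permission_key.split('.')
--     for i in range(len(parts) - 1):
--         wildcard = '.'.join(parts[:i+1]) + '.*'
--         if wildcard in permission_set:
--             return True
--
--     return False
-- ===== SOURCE B (Python) =====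
-- def _has_field_permission(permission_key: str, permission_set) -> bool:
--     """Check if user has permission for a specific field"""
--     # Instead of generating every dotted prefix of the key and probing the set,
--     # scan the permission set once: an entry grants access if it equals the key
--     # exactly, or if it is a wildcard entry 'stem.*' whose 'stem.' is a prefix
--     # of the key (i.e. the key lies below that hierarchy level).
--     for perm in permission_set:
--         if perm == permission_key:
--             return True
--         if perm.endswith('.*') and permission_key.startswith(perm[:-1]):
--             return True
--     return False
-- ===== Notes on version B (the rewrite author's own statement) =====
-- stated objective: alternative
-- what changed: B inverts the traversal: instead of splitting the key and probing the set with every generated dotted-prefix wildcard, it makes a single pass over the permission set and pattern-matches each entry (exact equality, or an entry 'stem.*' whose 'stem.' is a prefix of the key); the OR over the same matches is traversal-order independent.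
import Mathlib
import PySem

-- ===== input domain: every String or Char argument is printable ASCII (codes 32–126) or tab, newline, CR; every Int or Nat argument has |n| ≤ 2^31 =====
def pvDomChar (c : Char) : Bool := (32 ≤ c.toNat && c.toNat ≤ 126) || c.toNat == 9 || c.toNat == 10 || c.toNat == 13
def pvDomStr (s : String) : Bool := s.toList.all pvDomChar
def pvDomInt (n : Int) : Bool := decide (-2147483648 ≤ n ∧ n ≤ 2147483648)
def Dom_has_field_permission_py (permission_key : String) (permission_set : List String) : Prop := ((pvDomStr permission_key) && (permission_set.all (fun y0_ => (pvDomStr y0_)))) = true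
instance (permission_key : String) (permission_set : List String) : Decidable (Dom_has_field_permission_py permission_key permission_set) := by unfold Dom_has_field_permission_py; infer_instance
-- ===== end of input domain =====

-- B inverts the traversal: instead of generating every dotted prefix of the key and probing the
-- set, it scans the permission set once and pattern-matches each entry ('== key', or 'stem.*'
-- with 'stem.' a prefix of the key); same return value, alternative algorithm.

-- ===== PORT A =====
def has_field_permission_py (permission_key : String) (permission_set : List String) : Bool :=
  if permission_set.contains permission_key then true
  else
    let parts := PySem.Chars.splitOn permission_key.toList ['.']
    (PySem.List.pyRange 0 ((parts.length : Int) - 1) 1).any (fun i =>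
      (permission_set.map String.toList).contains
        (PySem.Chars.join ['.'] (PySem.List.slice parts none (some (i + 1))) ++ ['.', '*']))

-- ===== PORT B =====
-- for perm in permission_set: perm == key → True; perm.endswith('.*') and key.startswith(perm[:-1]) → True
def hfpAltLoop (permission_key : String) : List String → Bool
  | [] => false
  | perm :: rest =>
    if perm == permission_key then true
    else if PySem.Str.endswith perm ".*"
            && PySem.Str.startswith permission_key (PySem.Str.slice perm none (some (-1))) then true
    else hfpAltLoop permission_key rest

def has_field_permission_py_alt (permission_key : String) (permission_set : List String) : Bool :=
  hfpAltLoop permission_key permission_set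

-- ===== PRECONDITION & SPEC =====
def Spec_has_field_permission_py (permission_key : String) (permission_set : List String) (out : Bool) : Prop := out = has_field_permission_py_alt permission_key permission_set
instance (permission_key : String) (permission_set : List String) (out : Bool) : Decidable (Spec_has_field_permission_py permission_key permission_set out) := by unfold Spec_has_field_permission_py; infer_instance

-- ===== CLAIM (what is proved, stated in full; the proofs are below) =====
def Claim_equal_has_field_permission_py : Prop := ∀ (permission_key : String) (permission_set : List String), Dom_has_field_permission_py permission_key permission_set → Spec_has_field_permission_py permission_key permission_set (has_field_permission_py permission_key permission_set)

-- ===== LEMMAS AND PROOFS =====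

-- structural description of Python's s.split('.') on the character list
def dsplit : List Char → List (List Char)
  | [] => [[]]
  | c :: rest => if c = '.' then [] :: dsplit rest else (dsplit rest).modifyHead (c :: ·)

theorem dsplit_ne_nil (cs : List Char) : dsplit cs ≠ [] := by
  induction cs with
  | nil => simp [dsplit]
  | cons c rest ih =>
    simp only [dsplit]
    split
    · simp
    · cases h : dsplit rest with
      | nil => exact absurd h ih
      | cons p ps => simp

theorem splitOn_go_eq (fuel : Nat) : ∀ (l cur : List Char) (acc : List (List Char)),
    l.length ≤ fuel →
    PySem.Chars.splitOn.go ['.'] fuel l cur acc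
      = acc.reverse ++ (dsplit l).modifyHead (fun x => cur.reverse ++ x) := by
  induction fuel with
  | zero =>
    intro l cur acc h
    have hl : l = [] := List.eq_nil_of_length_eq_zero (Nat.le_zero.mp h)
    subst hl
    simp [PySem.Chars.splitOn.go, dsplit]
  | succ f ih =>
    intro l cur acc h
    cases l with
    | nil => simp [PySem.Chars.splitOn.go, dsplit]
    | cons c rest =>
      by_cases hc : c = '.'
      · subst hc
        have hstep : PySem.Chars.splitOn.go ['.'] (f + 1) ('.' :: rest) cur acc
            = PySem.Chars.splitOn.go ['.'] f rest [] (cur.reverse :: acc) := by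
          simp [PySem.Chars.splitOn.go, List.isPrefixOf]
        rw [hstep, ih rest [] (cur.reverse :: acc) (by simpa using Nat.le_of_succ_le_succ h)]
        cases hdr : dsplit rest with
        | nil => exact absurd hdr (dsplit_ne_nil rest)
        | cons p ps => simp [dsplit, hdr]
      · have hstep : PySem.Chars.splitOn.go ['.'] (f + 1) (c :: rest) cur acc
            = PySem.Chars.splitOn.go ['.'] f rest (c :: cur) acc := by
          simp [PySem.Chars.splitOn.go, List.isPrefixOf, Ne.symm hc]
        rw [hstep, ih rest (c :: cur) acc (by simpa using Nat.le_of_succ_le_succ h)]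
        cases hdr : dsplit rest with
        | nil => exact absurd hdr (dsplit_ne_nil rest)
        | cons p ps => simp [dsplit, hc, hdr]

theorem splitOn_eq_dsplit (cs : List Char) : PySem.Chars.splitOn cs ['.'] = dsplit cs := by
  have h : PySem.Chars.splitOn cs ['.'] = PySem.Chars.splitOn.go ['.'] (cs.length + 1) cs [] [] := rfl
  rw [h, splitOn_go_eq (cs.length + 1) cs [] [] (by omega)]
  cases hdr : dsplit cs with
  | nil => exact absurd hdr (dsplit_ne_nil cs)
  | cons p ps => simp

-- "some '.' in cs has P of the prefix before it", structurally
def dotAny : List Char → (List Char → Bool) → Bool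
  | [], _ => false
  | c :: rest, P => (c == '.' && P []) || dotAny rest (fun x => P (c :: x))

theorem join_cons_head (c : Char) (p : List Char) (l : List (List Char)) :
    PySem.Chars.join ['.'] ((c :: p) :: l) = c :: PySem.Chars.join ['.'] (p :: l) := by
  cases l with
  | nil => simp [PySem.Chars.join_singleton]
  | cons q r => simp [PySem.Chars.join_cons_cons]

theorem a_side (cs : List Char) (P : List Char → Bool) :
    (List.range ((dsplit cs).length - 1)).any
        (fun k => P (PySem.Chars.join ['.'] ((dsplit cs).take (k + 1))))
      = dotAny cs P := by
  induction cs generalizing P with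
  | nil => simp [dsplit, dotAny]
  | cons c rest ih =>
    cases hdr : dsplit rest with
    | nil => exact absurd hdr (dsplit_ne_nil rest)
    | cons p ps =>
      have ihh := ih (fun x => P (c :: x))
      rw [hdr] at ihh
      simp only [List.length_cons, Nat.add_sub_cancel, List.take_succ_cons] at ihh
      by_cases hc : c = '.'
      · subst hc
        have hd : dsplit ('.' :: rest) = [] :: p :: ps := by simp [dsplit, hdr]
        rw [hd]
        simp only [List.length_cons, Nat.add_sub_cancel, List.range_succ_eq_map,
          List.any_cons, List.any_map, List.take_succ_cons, List.take_zero,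
          PySem.Chars.join_singleton, Function.comp_def, Nat.succ_eq_add_one,
          PySem.Chars.join_cons_cons, List.nil_append, List.singleton_append]
        simp only [dotAny, beq_self_eq_true, Bool.true_and]
        rw [← ihh]
      · have hd : dsplit (c :: rest) = (c :: p) :: ps := by
          simp [dsplit, if_neg hc, hdr]
        rw [hd]
        simp only [List.length_cons, Nat.add_sub_cancel, List.take_succ_cons,
          join_cons_head]
        have hcb : (c == '.') = false := by simpa using hc
        simp only [dotAny, hcb, Bool.false_and, Bool.false_or]
        rw [← ihh]

-- dotAny holds iff cs splits as p ++ '.' :: q with P p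
theorem dotAny_iff (cs : List Char) (P : List Char → Bool) :
    dotAny cs P = true ↔ ∃ p q, cs = p ++ '.' :: q ∧ P p = true := by
  induction cs generalizing P with
  | nil =>
    simp only [dotAny, Bool.false_eq_true, false_iff]
    rintro ⟨p, q, h, _⟩
    exact absurd h (by simp)
  | cons c rest ih =>
    simp only [dotAny, Bool.or_eq_true, Bool.and_eq_true, beq_iff_eq, ih]
    constructor
    · rintro (⟨hc, hP⟩ | ⟨p, q, hr, hP⟩)
      · exact ⟨[], rest, by simp [hc], hP⟩
      · exact ⟨c :: p, q, by simp [hr], hP⟩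
    · rintro ⟨p, q, hr, hP⟩
      cases p with
      | nil =>
        simp only [List.nil_append, List.cons.injEq] at hr
        exact Or.inl ⟨hr.1, hP⟩
      | cons d p' =>
        simp only [List.cons_append, List.cons.injEq] at hr
        exact Or.inr ⟨p', q, hr.2, by rw [hr.1]; exact hP⟩

-- B's per-element wildcard test, characterised by the same split
theorem cond_iff (key w : String) :
    (PySem.Str.endswith w ".*"
       && PySem.Str.startswith key (PySem.Str.slice w none (some (-1)))) = true
      ↔ ∃ p q, key.toList = p ++ '.' :: q ∧ w.toList = p ++ ['.', '*'] := by
  have hsl : (PySem.Str.slice w none (some (-1))).toList = w.toList.dropLast :=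
    PySem.Str.slice_to_neg_one w
  rw [Bool.and_eq_true, PySem.Str.endswith_eq, PySem.Str.startswith_eq, hsl,
    PySem.Chars.endswith_iff, PySem.Chars.startswith_iff]
  constructor
  · rintro ⟨⟨s, hs⟩, hpre⟩
    have hws : w.toList = s ++ ['.', '*'] := hs.symm
    have hdl : w.toList.dropLast = s ++ ['.'] := by
      rw [hws]
      have : s ++ ['.', '*'] = (s ++ ['.']) ++ ['*'] := by simp
      rw [this, List.dropLast_concat]
    rw [hdl] at hpre
    obtain ⟨t, ht⟩ := hpre
    exact ⟨s, t, by rw [← ht]; simp, hws⟩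
  · rintro ⟨p, q, hk, hw⟩
    have hsuf : String.toList ".*" <:+ w.toList := ⟨p, by simp [hw]⟩
    have hdl : w.toList.dropLast = p ++ ['.'] := by
      rw [hw]
      have : p ++ ['.', '*'] = (p ++ ['.']) ++ ['*'] := by simp
      rw [this, List.dropLast_concat]
    exact ⟨hsuf, hdl ▸ ⟨q, by simp [hk]⟩⟩

-- B's loop is an 'any' over the set
theorem altLoop_eq_any (key : String) (L : List String) :
    hfpAltLoop key L
      = L.any (fun w => (w == key)
          || (PySem.Str.endswith w ".*"
              && PySem.Str.startswith key (PySem.Str.slice w none (some (-1))))) := by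
  induction L with
  | nil => rfl
  | cons w rest ih =>
    simp only [hfpAltLoop, List.any_cons, ← ih]
    by_cases h1 : w = key
    · simp [h1]
    · have hb : (w == key) = false := by simpa using h1
      simp only [hb, Bool.false_or]
      split <;> simp_all

-- ===== VERDICT (by name: the statement is the Claim_ definition above) =====
theorem has_field_permission_py_spec : Claim_equal_has_field_permission_py := by
  intro permission_key permission_set _
  unfold Spec_has_field_permission_py has_field_permission_py has_field_permission_py_alt
  rw [altLoop_eq_any]
  by_cases hmem : permission_set.contains permission_key
  · rw [if_pos hmem]
    symm
    rw [List.any_eq_true]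
    exact ⟨permission_key, by simpa using hmem, by simp⟩
  · rw [if_neg hmem]
    set cs := permission_key.toList with hcs
    set P : List Char → Bool :=
      fun pre => (permission_set.map String.toList).contains (pre ++ ['.', '*']) with hP
    rw [splitOn_eq_dsplit]
    dsimp only
    have hcast : (((dsplit cs).length : Int) - 1) = (((dsplit cs).length - 1 : Nat) : Int) := by
      have : 1 ≤ (dsplit cs).length := by
        cases hdr : dsplit cs with
        | nil => exact absurd hdr (dsplit_ne_nil cs)
        | cons p ps => simp
      omega
    rw [hcast, PySem.List.pyRange_zero_natCast, List.any_map]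
    have hfun : ((fun i => P (PySem.Chars.join ['.']
          (PySem.List.slice (dsplit cs) none (some (i + 1))))) ∘ (fun k : Nat => (k : Int)))
        = (fun k : Nat => P (PySem.Chars.join ['.'] ((dsplit cs).take (k + 1)))) := by
      funext k
      simp only [Function.comp_apply]
      have hk : ((k : Int) + 1) = ((k + 1 : Nat) : Int) := by push_cast; ring
      rw [hk, PySem.List.slice_to_natCast]
    rw [hfun, a_side cs P]
    have hnot : permission_key ∉ permission_set := by simpa using hmem
    rw [Bool.eq_iff_iff, dotAny_iff]
    simp only [List.any_eq_true, Bool.or_eq_true, beq_iff_eq]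
    constructor
    · rintro ⟨p, q, hsplit, hPp⟩
      simp only [hP, List.contains_eq_mem, List.mem_map, decide_eq_true_eq] at hPp
      obtain ⟨w, hwL, hwl⟩ := hPp
      exact ⟨w, hwL, Or.inr ((cond_iff permission_key w).mpr ⟨p, q, hsplit, hwl⟩)⟩
    · rintro ⟨w, hwL, (hkey | hcond)⟩
      · exact absurd (hkey ▸ hwL) hnot
      · obtain ⟨p, q, hsplit, hwl⟩ := (cond_iff permission_key w).mp hcond
        refine ⟨p, q, hsplit, ?_⟩
        simp only [hP, List.contains_eq_mem, List.mem_map, decide_eq_true_eq]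
        exact ⟨w, hwL, hwl⟩
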